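-- pv_equiv track=rewrite | github.com/AliciaGuerreroS/tallerdeIteradoresGeneradores | tallerGeneradores.py | funcion_generadora
-- ===== SOURCE A (Python) =====
-- def funcion_generadora(lista):
--     listaNueva= []
--     for palabra in lista:
--         diccionario= {}
--         for letra in palabra:
--             contador= palabra.count(letra)
--             diccionario[letra]= contador
--         listaNueva.append(diccionario)
--     return listaNueva
-- ===== SOURCE B (Python) =====
-- def funcion_generadora(lista):
--     # Sort each word's letters, count runs of equal letters in one grouped pass,
--     # then present the counts in first-occurrence order of the original word.
--     resultado = []
--     for palabra in lista:
--         ordenadas = sorted(palabra)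
--         conteos = {}
--         i = 0
--         n = len(ordenadas)
--         while i < n:
--             j = i
--             while j < n and ordenadas[j] == ordenadas[i]:
--                 j += 1
--             conteos[ordenadas[i]] = j - i
--             i = j
--         resultado.append({letra: conteos[letra] for letra in dict.fromkeys(palabra)})
--     return resultado
-- ===== Notes on version B (the rewrite author's own statement) =====
-- stated objective: alternative
-- what changed: Instead of calling palabra.count(letra) (a rescan of the word) for every letter, B sorts each word's letters, counts runs of equal letters in a single grouped pass over the sorted sequence, and then emits {letter: run_length} in the word's first-occurrence key order.
import Mathlib
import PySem

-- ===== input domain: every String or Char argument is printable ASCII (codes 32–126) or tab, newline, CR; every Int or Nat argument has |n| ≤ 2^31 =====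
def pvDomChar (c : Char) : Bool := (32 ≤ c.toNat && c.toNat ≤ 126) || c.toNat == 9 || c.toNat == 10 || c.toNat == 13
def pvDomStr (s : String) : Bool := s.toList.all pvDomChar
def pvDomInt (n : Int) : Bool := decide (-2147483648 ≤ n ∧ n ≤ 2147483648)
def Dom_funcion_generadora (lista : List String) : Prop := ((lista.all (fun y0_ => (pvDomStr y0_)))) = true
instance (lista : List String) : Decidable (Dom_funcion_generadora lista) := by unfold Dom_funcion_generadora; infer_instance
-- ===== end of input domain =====

-- B replaces A's per-letter full rescans (palabra.count) with sort + one run-length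
-- grouping pass per word, reordered to first-occurrence key order; an alternative
-- algorithm of similar measured cost, not claimed faster.

-- ===== PORT A =====
-- for palabra in lista: {letra: palabra.count(letra) for each letra, inserted in order}
def funcion_generadora (lista : List String) : List (List (String × Int)) :=
  lista.foldl
    (fun listaNueva palabra =>
      listaNueva ++
        [(palabra.toList.foldl
            (fun diccionario letra =>
              diccionario.insert (String.ofList [letra])
                ((PySem.Str.count palabra (String.ofList [letra]) : Int)))
            (PySem.Dict.empty : PySem.Dict String Int)).items])
    []

-- ===== PORT B =====
-- the inner while loops of Source B: run-length counting over the (sorted) letters;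
-- each run [i, j) of equal letters contributes one pair (letter, j - i)
def pvRuns : List Char → List (Char × Int)
  | [] => []
  | c :: rest =>
      (c, (1 + (rest.takeWhile (· == c)).length : Int)) :: pvRuns (rest.dropWhile (· == c))
  termination_by l => l.length
  decreasing_by simpa using Nat.lt_succ_of_le (List.length_dropWhile_le _ _)

-- sorted(palabra) → run-length counts → dict.fromkeys(palabra) order.
-- conteos[letra] is total in Source B (every key of fromkeys(palabra) occurs in conteos);
-- `(….lookup letra).getD 0` is that lookup, exact on those keys.
def funcion_generadora_alt (lista : List String) : List (List (String × Int)) :=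
  lista.map (fun palabra =>
    let conteos := pvRuns (PySem.List.sorted palabra.toList (fun c => c) false)
    (PySem.List.dedup palabra.toList).map
      (fun letra => (String.ofList [letra], (conteos.lookup letra).getD 0)))

-- ===== PRECONDITION & SPEC =====
def Spec_funcion_generadora (lista : List String) (out : List (List (String × Int))) : Prop := out = funcion_generadora_alt lista
instance (lista : List String) (out : List (List (String × Int))) : Decidable (Spec_funcion_generadora lista out) := by unfold Spec_funcion_generadora; infer_instance

-- ===== CLAIM =====
def Claim_equal_funcion_generadora : Prop := ∀ (lista : List String), Dom_funcion_generadora lista → Spec_funcion_generadora lista (funcion_generadora lista)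

-- ===== LEMMAS AND PROOFS =====

-- the singleton-string constructor is injective
lemma pv_mk_inj : Function.Injective (fun c => String.ofList [c]) := by
  intro a b h
  have h2 := congrArg String.toList h
  simpa using h2

-- Python's s.count(c) for a single character equals List.count on the characters
lemma pv_count_go_singleton (c : Char) :
    ∀ (l : List Char) (fuel acc : Nat), l.length ≤ fuel →
      PySem.Chars.count.go [c] fuel l acc = acc + l.count c := by
  intro l
  induction l with
  | nil =>
      intro fuel acc _
      cases fuel <;> simp [PySem.Chars.count.go]
  | cons h t ih =>
      intro fuel acc hle
      cases fuel with
      | zero => simp at hle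
      | succ fuel =>
          rw [PySem.Chars.count.go]
          by_cases hc : c = h
          · subst hc
            simp [List.isPrefixOf, ih fuel (acc + 1) (by simpa using hle)]
            omega
          · have : ([c].isPrefixOf (h :: t)) = false := by
              simp [List.isPrefixOf]; exact fun hco => (hc hco).elim
            simp [this, ih fuel acc (by simpa using hle), Ne.symm hc]

lemma pv_count_singleton (s : List Char) (c : Char) :
    PySem.Chars.count s [c] = s.count c := by
  unfold PySem.Chars.count
  simp [pv_count_go_singleton c s s.length 0 le_rfl]

-- A's inner loop: inserting a value that is a fixed function of the letter
lemma pv_items_fold_insert_fun (v : Char → Int) (cs : List Char) :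
    (cs.foldl (fun d c => d.insert (String.ofList [c]) (v c))
        (PySem.Dict.empty : PySem.Dict String Int)).items
      = (PySem.Set.ofList cs).map (fun c => (String.ofList [c], v c)) := by
  induction cs using List.reverseRecOn with
  | nil => rfl
  | append_singleton cs c ih =>
      rw [List.foldl_append, List.foldl_cons, List.foldl_nil]
      have hkeys : (cs.foldl (fun d c => d.insert (String.ofList [c]) (v c))
          (PySem.Dict.empty : PySem.Dict String Int)).keys
            = (PySem.Set.ofList cs).map (fun c => String.ofList [c]) := by
        simp only [PySem.Dict.keys, ih, List.map_map]
        rfl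
      have hofl : PySem.Set.ofList (cs ++ [c])
          = (PySem.Set.ofList cs).add c := by
        simp [PySem.Set.ofList, List.foldl_append]
      by_cases hc : c ∈ cs
      · have hcS : c ∈ PySem.Set.ofList cs := by
          rw [PySem.Set.mem_ofList]; exact hc
        have hcont : (cs.foldl (fun d c => d.insert (String.ofList [c]) (v c))
            (PySem.Dict.empty : PySem.Dict String Int)).contains (String.ofList [c]) = true := by
          rw [PySem.Dict.contains_iff_mem_keys, hkeys]
          exact List.mem_map_of_mem hcS
        rw [PySem.Dict.items_insert_of_contains _ _ hcont, ih, List.map_map]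
        have hadd : (PySem.Set.ofList cs).add c = PySem.Set.ofList cs := by
          unfold PySem.Set.add
          simp [hcS]
        rw [hofl, hadd]
        apply List.map_congr_left
        intro x _
        by_cases hx : x = c
        · subst hx; simp
        · have hne : ¬ (String.ofList [x] = String.ofList [c]) :=
            fun he => hx (pv_mk_inj he)
          simp [hne]
      · have hcS : c ∉ PySem.Set.ofList cs := by
          rw [PySem.Set.mem_ofList]; exact hc
        have hcont : (cs.foldl (fun d c => d.insert (String.ofList [c]) (v c))
            (PySem.Dict.empty : PySem.Dict String Int)).contains (String.ofList [c]) = false := by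
          rw [Bool.eq_false_iff, ne_eq, PySem.Dict.contains_iff_mem_keys, hkeys]
          intro hmem
          rcases List.mem_map.mp hmem with ⟨x, hx, he⟩
          exact hcS (by rwa [pv_mk_inj he] at hx)
        rw [PySem.Dict.items_insert_of_not_contains _ _ hcont, ih]
        have hadd : (PySem.Set.ofList cs).add c = PySem.Set.ofList cs ++ [c] := by
          unfold PySem.Set.add
          simp [hcS]
        rw [hofl, hadd]
        simp

-- run-length lookup on a (≤)-sorted char list is exactly List.count
lemma pv_runs_lookup : ∀ (l : List Char), l.Pairwise (· ≤ ·) → ∀ x : Char,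
    (pvRuns l).lookup x = if x ∈ l then some ((l.count x : Int)) else none := by
  intro l
  induction l using pvRuns.induct with
  | case1 => intro _ x; simp [pvRuns]
  | case2 c rest ih =>
      intro hp x
      have hrest : ∀ y ∈ rest, c ≤ y := fun y hy => (List.pairwise_cons.mp hp).1 y hy
      have hpr : rest.Pairwise (· ≤ ·) := (List.pairwise_cons.mp hp).2
      have hsplit : rest = rest.takeWhile (· == c) ++ rest.dropWhile (· == c) :=
        (List.takeWhile_append_dropWhile).symm
      have htw : ∀ y ∈ rest.takeWhile (· == c), y = c := by
        intro y hy
        have := List.mem_takeWhile_imp hy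
        simpa using this
      have hdw_pair : (rest.dropWhile (· == c)).Pairwise (· ≤ ·) :=
        hpr.sublist (List.dropWhile_sublist _)
      have hcndw : c ∉ rest.dropWhile (· == c) := by
        intro hmem
        rcases hdwEq : rest.dropWhile (· == c) with _ | ⟨d, t⟩
        · rw [hdwEq] at hmem; simp at hmem
        · have h := List.head?_dropWhile_not (fun x => x == c) rest
          rw [hdwEq] at h
          have hdne : (d == c) = false := by simpa using h
          have hdc : d ≠ c := by simpa using hdne
          have hdm : d ∈ rest := (List.dropWhile_sublist _).subset (by rw [hdwEq]; simp)
          have hcd : c ≤ d := hrest d hdm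
          rw [hdwEq] at hmem hdw_pair
          rcases List.mem_cons.mp hmem with h1 | h1
          · exact hdc h1.symm
          · have hdy : d ≤ c := (List.pairwise_cons.mp hdw_pair).1 c h1
            exact hdc (le_antisymm hdy hcd)
      rw [pvRuns]
      by_cases hx : x = c
      · subst hx
        have hcount : (x :: rest).count x = 1 + (rest.takeWhile (· == x)).length := by
          rw [List.count_cons_self]
          conv_lhs => rw [hsplit]
          rw [List.count_append]
          have h1 : (rest.takeWhile (· == x)).count x = (rest.takeWhile (· == x)).length :=
            List.count_eq_length.mpr (fun y hy => by simp [htw y hy])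
          have h2 : (rest.dropWhile (· == x)).count x = 0 :=
            List.count_eq_zero.mpr hcndw
          omega
        simp [List.lookup, hcount]
      · have hmemtw : x ∉ rest.takeWhile (· == c) := fun h => hx (htw x h)
        have hmemiff : x ∈ c :: rest ↔ x ∈ rest.dropWhile (· == c) := by
          constructor
          · intro h
            rcases List.mem_cons.mp h with h | h
            · exact absurd h hx
            · rw [hsplit] at h
              rcases List.mem_append.mp h with h | h
              · exact absurd h hmemtw
              · exact h
          · intro h
            exact List.mem_cons_of_mem _ ((List.dropWhile_sublist _).subset h)
        have hcounteq : (c :: rest).count x = (rest.dropWhile (· == c)).count x := by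
          have h0 : (c :: rest).count x = rest.count x := by
            simp [show ¬c = x from fun h => hx h.symm]
          conv_lhs => rw [h0, hsplit]
          rw [List.count_append]
          have : (rest.takeWhile (· == c)).count x = 0 :=
            List.count_eq_zero.mpr hmemtw
          omega
        have hbx : (x == c) = false := by simpa using hx
        simp only [List.lookup, hbx]
        rw [ih hdw_pair x, hcounteq]
        by_cases hm : x ∈ rest.dropWhile (· == c)
        · simp [hm, hmemiff.mpr hm]
        · have hxr : x ∉ rest := fun h => hm (hmemiff.mp (List.mem_cons_of_mem _ h))
          simp [hm, hx, hxr]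

-- per word, A's dict equals B's staged sort-and-group result
lemma pv_word (palabra : String) :
    (palabra.toList.foldl
        (fun diccionario letra =>
          diccionario.insert (String.ofList [letra])
            ((PySem.Str.count palabra (String.ofList [letra]) : Int)))
        (PySem.Dict.empty : PySem.Dict String Int)).items
      = (PySem.List.dedup palabra.toList).map
          (fun letra => (String.ofList [letra],
            ((pvRuns (PySem.List.sorted palabra.toList (fun c => c) false)).lookup letra).getD 0)) := by
  rw [pv_items_fold_insert_fun]
  rw [show PySem.List.dedup palabra.toList = PySem.Set.ofList palabra.toList from
    PySem.List.dedup_eq_ofList _]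
  apply List.map_congr_left
  intro c hc
  have hmem : c ∈ palabra.toList := (PySem.Set.mem_ofList _ _).mp hc
  have hms : c ∈ PySem.List.sorted palabra.toList (fun c => c) false :=
    (PySem.List.mem_sorted _ _ _ _).mpr hmem
  have hpair : (PySem.List.sorted palabra.toList (fun c => c) false).Pairwise (· ≤ ·) := by
    simpa using PySem.List.sorted_pairwise (xs := palabra.toList) (key := fun c => c)
  rw [pv_runs_lookup _ hpair c, if_pos hms]
  have hcnt : (PySem.List.sorted palabra.toList (fun c => c) false).count c
      = palabra.toList.count c :=
    (PySem.List.sorted_perm (xs := palabra.toList) (key := fun c => c) (rev := false)).count_eq c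
  simp [hcnt, pv_count_singleton]

-- ===== VERDICT =====
theorem funcion_generadora_spec : Claim_equal_funcion_generadora := by
  intro lista _
  unfold Spec_funcion_generadora funcion_generadora funcion_generadora_alt
  rw [PySem.List.foldl_append_singleton_eq_map]
  exact List.map_congr_left (fun palabra _ => pv_word palabra)
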